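-- pv_equiv track=rewrite | github.com/pypi-data/pypi-mirror-74 | packages/xlist/xlist-0.0.4.tar.gz/xlist-0.0.4/xlist/elist.py | rangize_supp
-- ===== SOURCE A (Python) =====
-- def rangize_supp(spans,lngth):
--     '''
--         spans = [(0, 3), (4, 7), (8, 10), (11, 12), (13, 16), (17, 20)]
--         rangize_supplement(spans,24)
--
--     '''
--     rslt = []
--     si = 0
--     ei = spans[0][0]
--     if(si == ei):
--         pass
--     else:
--         rslt.append((si,ei))
--     prev_ei = spans[0][1]
--     for i in range(1,spans.__len__()):
--         si = prev_ei
--         ei = spans[i][0]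
--         rslt.append((si,ei))
--         prev_ei = spans[i][1]
--     if(prev_ei < lngth):
--         rslt.append((prev_ei,lngth))
--     else:
--         pass
--     return(rslt)
-- ===== SOURCE B (Python) =====
-- def rangize_supp(spans, lngth):
--     # Build all boundary pairs at once: gap candidates are zip([0]+ends, starts+[lngth]).
--     lefts = [0] + [e for (_, e) in spans]
--     rights = [s for (s, _) in spans] + [lngth]
--     pairs = list(zip(lefts, rights))
--     if pairs and pairs[0][0] == pairs[0][1]:
--         pairs = pairs[1:]
--     if pairs and pairs[-1][0] >= lngth:
--         pairs = pairs[:-1]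
--     return pairs
-- ===== Notes on version B (the rewrite author's own statement) =====
-- stated objective: alternative
-- what changed: B builds the complement in one shot by zipping the boundary lists [0]+ends and starts+[lngth] and then trimming the first pair when degenerate and the last when it starts at or past lngth, instead of A's stateful loop threading prev_ei with separate head/tail appends.
import Mathlib
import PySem

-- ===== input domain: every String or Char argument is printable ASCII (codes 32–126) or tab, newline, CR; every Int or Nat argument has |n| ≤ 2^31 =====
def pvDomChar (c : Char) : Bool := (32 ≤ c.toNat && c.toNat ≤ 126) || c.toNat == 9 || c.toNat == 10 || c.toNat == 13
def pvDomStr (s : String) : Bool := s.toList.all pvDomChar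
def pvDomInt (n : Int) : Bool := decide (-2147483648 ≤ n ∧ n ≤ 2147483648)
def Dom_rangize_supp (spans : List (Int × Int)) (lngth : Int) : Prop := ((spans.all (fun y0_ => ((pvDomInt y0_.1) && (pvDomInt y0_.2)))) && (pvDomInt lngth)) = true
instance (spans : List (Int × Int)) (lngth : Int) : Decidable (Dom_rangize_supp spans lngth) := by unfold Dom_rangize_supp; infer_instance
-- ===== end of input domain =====

-- B builds gap ranges by zipping the two boundary lists and trimming the endpoints,
-- instead of A's stateful loop; same values on every non-empty spans list (alternative, not faster).


-- ===== PORT A =====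
-- Literal port of A: head gap (si,ei) unless si == ei, then the for-loop over the
-- remaining spans threading prev_ei, then the tail gap when prev_ei < lngth.
-- (spans[0] raises IndexError on empty spans; Pre_ excludes that input, so the
-- headD default is never reached inside Pre_.)
def rangize_supp (spans : List (Int × Int)) (lngth : Int) : List (Int × Int) :=
  let si : Int := 0
  let ei : Int := (spans.headD (0, 0)).1
  let rslt : List (Int × Int) := if si = ei then [] else [(si, ei)]
  let prev_ei : Int := (spans.headD (0, 0)).2
  let st := (spans.drop 1).foldl
    (fun (st : List (Int × Int) × Int) p => (st.1 ++ [(st.2, p.1)], p.2))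
    (rslt, prev_ei)
  if st.2 < lngth then st.1 ++ [(st.2, lngth)] else st.1

-- ===== PORT B =====
-- Literal port of B: zip the boundary lists, drop a degenerate first pair, drop the
-- last pair when its left coordinate is ≥ lngth.
def rangize_supp_alt (spans : List (Int × Int)) (lngth : Int) : List (Int × Int) :=
  let lefts : List Int := 0 :: spans.map Prod.snd
  let rights : List Int := spans.map Prod.fst ++ [lngth]
  let pairs := List.zip lefts rights
  let pairs1 := if pairs ≠ [] ∧ (pairs.headD (0, 0)).1 = (pairs.headD (0, 0)).2
                then pairs.tail else pairs
  if pairs1 ≠ [] ∧ (pairs1.getLastD (0, 0)).1 ≥ lngth then pairs1.dropLast else pairs1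

-- ===== PRECONDITION & SPEC =====
-- Pre_ excludes only the empty spans list, on which A raises IndexError at spans[0].
def Pre_rangize_supp (spans : List (Int × Int)) (lngth : Int) : Prop := spans ≠ []
instance (spans : List (Int × Int)) (lngth : Int) : Decidable (Pre_rangize_supp spans lngth) := by unfold Pre_rangize_supp; infer_instance
def pvWitness_rangize_supp : (List (Int × Int)) × Int := ([(0, 3), (4, 7)], 10)

def Spec_rangize_supp (spans : List (Int × Int)) (lngth : Int) (out : List (Int × Int)) : Prop := out = rangize_supp_alt spans lngth
instance (spans : List (Int × Int)) (lngth : Int) (out : List (Int × Int)) : Decidable (Spec_rangize_supp spans lngth out) := by unfold Spec_rangize_supp; infer_instance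

-- ===== CLAIM (what is proved, stated in full; the proofs are below) =====
def Claim_equal_rangize_supp : Prop := ∀ (spans : List (Int × Int)) (lngth : Int), Dom_rangize_supp spans lngth → Pre_rangize_supp spans lngth → Spec_rangize_supp spans lngth (rangize_supp spans lngth)
-- ===== LEMMAS AND PROOFS =====

-- The interior gaps (prev, s₁), (e₁, s₂), … and the final prev_ei of A's loop.
def pvGaps (prev : Int) (l : List (Int × Int)) : List (Int × Int) :=
  match l with
  | [] => []
  | (s, e) :: t => (prev, s) :: pvGaps e t

def pvLastEnd (prev : Int) (l : List (Int × Int)) : Int :=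
  match l with
  | [] => prev
  | (_, e) :: t => pvLastEnd e t

theorem pvFoldl_char (l : List (Int × Int)) (acc : List (Int × Int)) (prev : Int) :
    l.foldl (fun (st : List (Int × Int) × Int) p => (st.1 ++ [(st.2, p.1)], p.2)) (acc, prev)
      = (acc ++ pvGaps prev l, pvLastEnd prev l) := by
  induction l generalizing acc prev with
  | nil => simp [pvGaps, pvLastEnd]
  | cons p t ih =>
      obtain ⟨s, e⟩ := p
      simp [List.foldl_cons, ih, pvGaps, pvLastEnd]

theorem pvZip_char (e L : Int) (l : List (Int × Int)) :
    List.zip (e :: l.map Prod.snd) (l.map Prod.fst ++ [L])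
      = pvGaps e l ++ [(pvLastEnd e l, L)] := by
  induction l generalizing e with
  | nil => simp [pvGaps, pvLastEnd]
  | cons p t ih =>
      obtain ⟨s, e'⟩ := p
      simp [pvGaps, pvLastEnd, ih]

theorem pvCore_ne (e L : Int) (l : List (Int × Int)) :
    pvGaps e l ++ [(pvLastEnd e l, L)] ≠ [] := by
  simp

-- Closed form of B's port on a non-empty spans list.
theorem pvAlt_char (s0 e0 lngth : Int) (rest : List (Int × Int)) :
    rangize_supp_alt ((s0, e0) :: rest) lngth
      = (if (0 : Int) = s0 then [] else [(0, s0)])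
          ++ pvGaps e0 rest
          ++ (if pvLastEnd e0 rest < lngth then [(pvLastEnd e0 rest, lngth)] else []) := by
  simp only [rangize_supp_alt, List.map_cons, List.cons_append, List.zip_cons_cons,
    pvZip_char, ne_eq, List.cons_ne_nil, not_false_eq_true, true_and, List.headD_cons,
    List.tail_cons]
  by_cases h0 : (0 : Int) = s0
  · by_cases hl : pvLastEnd e0 rest < lngth
    · have hge : ¬ ((pvLastEnd e0 rest) ≥ lngth) := by omega
      simp [h0, hl, hge]
    · have hge : (pvLastEnd e0 rest) ≥ lngth := by omega
      simp [h0, hl, hge]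
  · have hlast : (((0 : Int), s0) :: (pvGaps e0 rest ++ [(pvLastEnd e0 rest, lngth)])).getLast?
        = some (pvLastEnd e0 rest, lngth) := by
      rw [show ((0, s0) :: (pvGaps e0 rest ++ [(pvLastEnd e0 rest, lngth)]))
            = (((0, s0) :: pvGaps e0 rest) ++ [(pvLastEnd e0 rest, lngth)]) from by simp,
        List.getLast?_concat]
    by_cases hl : pvLastEnd e0 rest < lngth
    · have hge : ¬ (lngth ≤ pvLastEnd e0 rest) := by omega
      simp [h0, hl, hlast, hge]
    · have hge : lngth ≤ pvLastEnd e0 rest := by omega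
      simp [h0, hl, hlast, hge,
        List.dropLast_cons_of_ne_nil (pvCore_ne e0 lngth rest)]

-- ===== VERDICT (by name: the statement is the Claim_ definition above) =====
theorem rangize_supp_spec : Claim_equal_rangize_supp := by
  intro spans lngth _ hpre
  unfold Spec_rangize_supp
  cases spans with
  | nil => exact absurd rfl hpre
  | cons p rest =>
      obtain ⟨s0, e0⟩ := p
      rw [pvAlt_char]
      unfold rangize_supp
      simp only [List.headD_cons, List.drop_succ_cons, List.drop_zero, pvFoldl_char]
      by_cases hl : pvLastEnd e0 rest < lngth
      · rw [if_pos hl, if_pos hl]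
      · rw [if_neg hl, if_neg hl]
        simp
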